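-- pv_equiv track=rewrite | github.com/Lev-Excellenteam-2023/google-google-group-1 | variations.py | check_possible_variations
-- ===== SOURCE A (Python) =====
-- from typing import List
--
-- def check_possible_variations(original_word: str, candidate_words: List[str]) -> List[str]:
--     """
--     Receives a word and a list of candidates and returns a list of all the possible variations
--     :param original_word: str
--     :param possible_variations: list of str
--     :return: list of str
--     """
--     possible_variations = []
--     for candidate_word in candidate_words:
--         if len(candidate_word) == len(original_word):
--             # Check for one letter difference
--             if sum([1 if candidate_word[i] != original_word[i] else 0 for i in range(len(candidate_word))]) == 1:
--                 possible_variations.append(candidate_word)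
--         elif len(candidate_word) == len(original_word) + 1:
--             # Check for one letter addition
--             for i in range(len(candidate_word)):
--                 if candidate_word[:i] + candidate_word[i + 1:] == original_word:
--                     possible_variations.append(candidate_word)
--                     break
--         elif len(candidate_word) == len(original_word) - 1:
--             # Check for one letter deletion
--             for i in range(len(original_word)):
--                 if original_word[:i] + original_word[i + 1:] == candidate_word:
--                     possible_variations.append(candidate_word)
--                     break
--     return possible_variations
-- ===== SOURCE B (Python) =====
-- def check_possible_variations(original_word, candidate_words):
--     n = len(original_word)
--     result = []
--     for c in candidate_words:
--         d = len(c) - n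
--         if d < -1 or d > 1:
--             continue
--         # one pass: length of the common prefix
--         i = 0
--         while i < len(c) and i < n and c[i] == original_word[i]:
--             i += 1
--         if d == 0:
--             ok = i < n and c[i + 1:] == original_word[i + 1:]
--         elif d == 1:
--             ok = c[i + 1:] == original_word[i:]
--         else:
--             ok = original_word[i + 1:] == c[i:]
--         if ok:
--             result.append(c)
--     return result
-- ===== Notes on version B (the rewrite author's own statement) =====
-- stated objective: faster
-- what changed: Instead of per-candidate quadratic scans (mismatch-count list comprehension with indexing, or trying every deletion position and rebuilding the string with slices), B finds the common-prefix length in one pass and decides single-edit distance with one tail comparison per candidate.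
import Mathlib
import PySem

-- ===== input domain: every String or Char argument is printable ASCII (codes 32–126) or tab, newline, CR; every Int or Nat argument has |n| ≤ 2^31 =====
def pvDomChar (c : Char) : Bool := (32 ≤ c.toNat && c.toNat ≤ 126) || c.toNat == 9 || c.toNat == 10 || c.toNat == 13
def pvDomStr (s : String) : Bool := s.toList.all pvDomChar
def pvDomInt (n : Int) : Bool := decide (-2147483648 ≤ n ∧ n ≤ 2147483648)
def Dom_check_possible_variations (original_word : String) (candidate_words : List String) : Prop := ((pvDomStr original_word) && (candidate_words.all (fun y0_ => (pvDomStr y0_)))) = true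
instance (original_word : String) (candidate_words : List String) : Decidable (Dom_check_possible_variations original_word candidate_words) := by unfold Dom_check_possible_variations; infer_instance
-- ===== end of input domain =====

-- B replaces A's per-candidate quadratic scans by one common-prefix pass plus a single
-- tail comparison per candidate (objective: faster).

-- ===== PORT A =====
-- loop body of A's 'for candidate_word in candidate_words'
def pvStepA (original_word : String) (possible_variations : List String) (candidate_word : String) : List String :=
    let cl := candidate_word.toList
    let ol := original_word.toList
    if cl.length = ol.length then
      -- sum([1 if candidate_word[i] != original_word[i] else 0 for i in range(len(candidate_word))]) == 1
      if (((PySem.List.pyRange 0 (cl.length : Int) 1).map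
            (fun i => if PySem.List.pyGetD cl i ' ' ≠ PySem.List.pyGetD ol i ' ' then (1 : Int) else 0)).sum) = 1
      then possible_variations ++ [candidate_word] else possible_variations
    else if (cl.length : Int) = (ol.length : Int) + 1 then
      -- for i in range(len(candidate_word)): if candidate_word[:i] + candidate_word[i+1:] == original_word: append; break
      if (PySem.List.pyRange 0 (cl.length : Int) 1).any
          (fun i => PySem.List.slice cl none (some i) ++ PySem.List.slice cl (some (i + 1)) none == ol)
      then possible_variations ++ [candidate_word] else possible_variations
    else if (cl.length : Int) = (ol.length : Int) - 1 then
      if (PySem.List.pyRange 0 (ol.length : Int) 1).any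
          (fun i => PySem.List.slice ol none (some i) ++ PySem.List.slice ol (some (i + 1)) none == cl)
      then possible_variations ++ [candidate_word] else possible_variations
    else possible_variations

def check_possible_variations (original_word : String) (candidate_words : List String) : List String :=
  candidate_words.foldl (pvStepA original_word) []

-- ===== PORT B =====
-- length of the common prefix (B's while loop)
def pvLcp : List Char → List Char → Nat
  | x :: cs, y :: os => if x = y then pvLcp cs os + 1 else 0
  | _, _ => 0

def pvOneEdit (ol cl : List Char) : Bool :=
  if (cl.length : Int) - (ol.length : Int) < -1 ∨ (cl.length : Int) - (ol.length : Int) > 1 then false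
  else if (cl.length : Int) - (ol.length : Int) = 0 then
    decide (pvLcp cl ol < ol.length) && (cl.drop (pvLcp cl ol + 1) == ol.drop (pvLcp cl ol + 1))
  else if (cl.length : Int) - (ol.length : Int) = 1 then
    cl.drop (pvLcp cl ol + 1) == ol.drop (pvLcp cl ol)
  else
    ol.drop (pvLcp cl ol + 1) == cl.drop (pvLcp cl ol)

def check_possible_variations_alt (original_word : String) (candidate_words : List String) : List String :=
  candidate_words.filter (fun c => pvOneEdit original_word.toList c.toList)

-- ===== PRECONDITION & SPEC =====
def Spec_check_possible_variations (original_word : String) (candidate_words : List String) (out : List String) : Prop := out = check_possible_variations_alt original_word candidate_words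
instance (original_word : String) (candidate_words : List String) (out : List String) : Decidable (Spec_check_possible_variations original_word candidate_words out) := by unfold Spec_check_possible_variations; infer_instance

-- ===== CLAIM (what is proved, stated in full; the proofs are below) =====
def Claim_equal_check_possible_variations : Prop := ∀ (original_word : String) (candidate_words : List String), Dom_check_possible_variations original_word candidate_words → Spec_check_possible_variations original_word candidate_words (check_possible_variations original_word candidate_words)

-- ===== LEMMAS AND PROOFS =====

-- number of mismatching positions, for equal-length lists
def pvDcount : List Char → List Char → Int
  | x :: cs, y :: os => (if x ≠ y then 1 else 0) + pvDcount cs os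
  | _, _ => 0

theorem pvDcount_nonneg (cl ol : List Char) : 0 ≤ pvDcount cl ol := by
  induction cl generalizing ol with
  | nil => cases ol <;> simp [pvDcount]
  | cons x cs ih =>
    cases ol with
    | nil => simp [pvDcount]
    | cons y os =>
      have := ih os
      simp only [pvDcount]
      split_ifs <;> omega

theorem pvDcount_eq_zero_iff (cl ol : List Char) (h : cl.length = ol.length) :
    pvDcount cl ol = 0 ↔ cl = ol := by
  induction cl generalizing ol with
  | nil =>
    cases ol with
    | nil => simp [pvDcount]
    | cons y os => simp at h
  | cons x cs ih =>
    cases ol with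
    | nil => simp at h
    | cons y os =>
      have hlen : cs.length = os.length := by simpa using h
      have ht := pvDcount_nonneg cs os
      by_cases hxy : x = y
      · subst hxy
        simp [pvDcount, ih os hlen]
      · have hne : ¬(x :: cs = y :: os) := by simp [hxy]
        simp only [pvDcount, if_pos hxy, hne, iff_false]
        omega

theorem pvRangeSum (cl ol : List Char) (h : cl.length = ol.length) :
    ((List.range cl.length).map (fun k => if cl.getD k ' ' ≠ ol.getD k ' ' then (1 : Int) else 0)).sum
      = pvDcount cl ol := by
  induction cl generalizing ol with
  | nil => cases ol <;> simp [pvDcount]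
  | cons x cs ih =>
    cases ol with
    | nil => simp at h
    | cons y os =>
      have hlen : cs.length = os.length := by simpa using h
      rw [List.length_cons, List.range_succ_eq_map, List.map_cons, List.map_map, List.sum_cons]
      simp only [Function.comp_def, Nat.succ_eq_add_one, List.getD_cons_succ, List.getD_cons_zero]
      rw [ih os hlen]
      simp [pvDcount]

theorem pvSum_eq_dcount (cl ol : List Char) (h : cl.length = ol.length) :
    ((PySem.List.pyRange 0 (cl.length : Int) 1).map
      (fun i => if PySem.List.pyGetD cl i ' ' ≠ PySem.List.pyGetD ol i ' ' then (1 : Int) else 0)).sum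
    = pvDcount cl ol := by
  rw [PySem.List.pyRange_zero, List.map_map, Int.toNat_natCast]
  simp only [Function.comp_def, PySem.List.pyGetD_natCast]
  exact pvRangeSum cl ol h

theorem pvDcount_one_iff (cl ol : List Char) (h : cl.length = ol.length) :
    pvDcount cl ol = 1 ↔ (pvLcp cl ol < ol.length ∧ cl.drop (pvLcp cl ol + 1) = ol.drop (pvLcp cl ol + 1)) := by
  induction cl generalizing ol with
  | nil =>
    cases ol with
    | nil => simp [pvDcount, pvLcp]
    | cons y os => simp at h
  | cons x cs ih =>
    cases ol with
    | nil => simp at h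
    | cons y os =>
      have hlen : cs.length = os.length := by simpa using h
      by_cases hxy : x = y
      · subst hxy
        have hL : pvLcp (x :: cs) (x :: os) = pvLcp cs os + 1 := by simp [pvLcp]
        have hD : pvDcount (x :: cs) (x :: os) = pvDcount cs os := by simp [pvDcount]
        rw [hL, hD, ih os hlen]
        simp only [List.length_cons, List.drop_succ_cons]
        constructor
        · rintro ⟨ha, hb⟩; exact ⟨by omega, hb⟩
        · rintro ⟨ha, hb⟩; exact ⟨by omega, hb⟩
      · have hL : pvLcp (x :: cs) (y :: os) = 0 := by simp [pvLcp, hxy]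
        have hD : pvDcount (x :: cs) (y :: os) = 1 + pvDcount cs os := by simp [pvDcount, hxy]
        have h0 := pvDcount_eq_zero_iff cs os hlen
        have hn := pvDcount_nonneg cs os
        rw [hL, hD]
        simp only [List.length_cons, List.drop_succ_cons, List.drop_zero]
        constructor
        · intro h1
          have hz : pvDcount cs os = 0 := by omega
          exact ⟨by omega, h0.mp hz⟩
        · intro hr
          have := h0.mpr hr.2
          omega

theorem pvDel_exists_iff (cl ol : List Char) (h : cl.length = ol.length + 1) :
    (∃ k, k < cl.length ∧ cl.take k ++ cl.drop (k + 1) = ol) ↔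
      cl.drop (pvLcp cl ol + 1) = ol.drop (pvLcp cl ol) := by
  induction cl generalizing ol with
  | nil => simp at h
  | cons x cs ih =>
    cases ol with
    | nil =>
      have hcs : cs = [] := List.length_eq_zero_iff.mp (by simpa using h)
      subst hcs
      constructor
      · intro _; cases hxy : pvLcp [x] ([] : List Char) <;> simp [pvLcp] at hxy ⊢
      · intro _; exact ⟨0, by simp⟩
    | cons y os =>
      have hlen : cs.length = os.length + 1 := by simpa using h
      by_cases hxy : x = y
      · subst hxy
        have hL : pvLcp (x :: cs) (x :: os) = pvLcp cs os + 1 := by simp [pvLcp]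
        rw [hL, List.drop_succ_cons, List.drop_succ_cons, ← ih os hlen]
        constructor
        · rintro ⟨k, hk, he⟩
          cases k with
          | zero =>
            simp only [List.take_zero, List.nil_append, List.drop_succ_cons, List.drop_zero] at he
            refine ⟨0, by omega, ?_⟩
            simp [he]
          | succ k' =>
            simp only [List.take_succ_cons, List.drop_succ_cons, List.cons_append,
              List.cons.injEq, true_and] at he
            exact ⟨k', by simpa using hk, he⟩
        · rintro ⟨k', hk', he⟩
          refine ⟨k' + 1, by simpa using hk', ?_⟩
          simp [List.take_succ_cons, List.drop_succ_cons, he]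
      · have hL : pvLcp (x :: cs) (y :: os) = 0 := by simp [pvLcp, hxy]
        rw [hL]
        simp only [List.drop_succ_cons, List.drop_zero]
        constructor
        · rintro ⟨k, hk, he⟩
          cases k with
          | zero => simpa using he
          | succ k' =>
            exfalso
            simp only [List.take_succ_cons, List.cons_append, List.cons.injEq] at he
            exact hxy he.1
        · intro he
          exact ⟨0, by simp, by simpa using he⟩

theorem pvLcp_comm (cl ol : List Char) : pvLcp cl ol = pvLcp ol cl := by
  induction cl generalizing ol with
  | nil => cases ol <;> simp [pvLcp]
  | cons x cs ih =>
    cases ol with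
    | nil => simp [pvLcp]
    | cons y os =>
      by_cases hxy : x = y
      · subst hxy; simp [pvLcp, ih]
      · simp only [pvLcp]
        rw [if_neg hxy, if_neg (fun hc => hxy hc.symm)]

theorem pvAny_del (cl ol : List Char) (h : cl.length = ol.length + 1) :
    ((PySem.List.pyRange 0 (cl.length : Int) 1).any
      (fun i => PySem.List.slice cl none (some i) ++ PySem.List.slice cl (some (i + 1)) none == ol))
    = (cl.drop (pvLcp cl ol + 1) == ol.drop (pvLcp cl ol)) := by
  rw [Bool.eq_iff_iff, List.any_eq_true, beq_iff_eq, ← pvDel_exists_iff cl ol h]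
  constructor
  · rintro ⟨i, hmem, hpi⟩
    rw [PySem.List.mem_pyRange_one] at hmem
    obtain ⟨h0, hlt⟩ := hmem
    lift i to ℕ using h0 with k
    rw [PySem.List.slice_to_natCast,
      show (k : Int) + 1 = ((k + 1 : ℕ) : Int) from by push_cast; ring,
      PySem.List.slice_from_natCast, beq_iff_eq] at hpi
    exact ⟨k, by exact_mod_cast hlt, hpi⟩
  · rintro ⟨k, hk, he⟩
    refine ⟨(k : Int), ?_, ?_⟩
    · rw [PySem.List.mem_pyRange_one]
      exact ⟨Int.natCast_nonneg k, by exact_mod_cast hk⟩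
    · rw [PySem.List.slice_to_natCast,
        show (k : Int) + 1 = ((k + 1 : ℕ) : Int) from by push_cast; ring,
        PySem.List.slice_from_natCast, beq_iff_eq]
      exact he

theorem pvOneEdit_eq_len (ol cl : List Char) (h : cl.length = ol.length) :
    pvOneEdit ol cl
      = (decide (pvLcp cl ol < ol.length) && (cl.drop (pvLcp cl ol + 1) == ol.drop (pvLcp cl ol + 1))) := by
  unfold pvOneEdit
  rw [if_neg (by omega), if_pos (by omega)]

theorem pvOneEdit_eq_ins (ol cl : List Char) (h : cl.length = ol.length + 1) :
    pvOneEdit ol cl = (cl.drop (pvLcp cl ol + 1) == ol.drop (pvLcp cl ol)) := by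
  unfold pvOneEdit
  rw [if_neg (by omega), if_neg (by omega), if_pos (by omega)]

theorem pvOneEdit_eq_del (ol cl : List Char) (h : ol.length = cl.length + 1) :
    pvOneEdit ol cl = (ol.drop (pvLcp cl ol + 1) == cl.drop (pvLcp cl ol)) := by
  unfold pvOneEdit
  rw [if_neg (by omega), if_neg (by omega), if_neg (by omega)]

theorem pvOneEdit_eq_far (ol cl : List Char)
    (h : (cl.length : Int) - (ol.length : Int) < -1 ∨ (cl.length : Int) - (ol.length : Int) > 1) :
    pvOneEdit ol cl = false := by
  unfold pvOneEdit
  rw [if_pos h]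

theorem pvStep_eq (o c : String) (acc : List String) :
    pvStepA o acc c = if pvOneEdit o.toList c.toList then acc ++ [c] else acc := by
  simp only [pvStepA]
  by_cases h1 : c.toList.length = o.toList.length
  · rw [if_pos h1, pvOneEdit_eq_len o.toList c.toList h1]
    refine if_congr ?_ rfl rfl
    rw [pvSum_eq_dcount c.toList o.toList h1, pvDcount_one_iff c.toList o.toList h1]
    simp
  · rw [if_neg h1]
    by_cases h2 : c.toList.length = o.toList.length + 1
    · have hi2 : (c.toList.length : Int) = (o.toList.length : Int) + 1 := by omega
      rw [if_pos hi2, pvOneEdit_eq_ins o.toList c.toList h2]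
      refine if_congr ?_ rfl rfl
      rw [pvAny_del c.toList o.toList h2]
    · have hi2 : ¬((c.toList.length : Int) = (o.toList.length : Int) + 1) := by omega
      rw [if_neg hi2]
      by_cases h3 : o.toList.length = c.toList.length + 1
      · have hi3 : (c.toList.length : Int) = (o.toList.length : Int) - 1 := by omega
        rw [if_pos hi3, pvOneEdit_eq_del o.toList c.toList h3]
        refine if_congr ?_ rfl rfl
        rw [pvAny_del o.toList c.toList h3, pvLcp_comm o.toList c.toList]
      · have hi3 : ¬((c.toList.length : Int) = (o.toList.length : Int) - 1) := by omega
        have hg : (c.toList.length : Int) - (o.toList.length : Int) < -1 ∨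
            (c.toList.length : Int) - (o.toList.length : Int) > 1 := by omega
        rw [if_neg hi3, pvOneEdit_eq_far o.toList c.toList hg]
        simp

-- ===== VERDICT (by name: the statement is the Claim_ definition above) =====
theorem check_possible_variations_spec : Claim_equal_check_possible_variations := by
  intro o cs _
  show check_possible_variations o cs = check_possible_variations_alt o cs
  unfold check_possible_variations check_possible_variations_alt
  have H : ∀ (l : List String) (acc : List String),
      l.foldl (pvStepA o) acc = acc ++ l.filter (fun c => pvOneEdit o.toList c.toList) := by
    intro l
    induction l with
    | nil => intro acc; simp
    | cons c l ih =>
      intro acc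
      rw [List.foldl_cons, pvStep_eq o c acc, List.filter_cons]
      by_cases hp : pvOneEdit o.toList c.toList
      · simp [hp, ih]
      · simp [hp, ih]
  simpa using H cs []
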